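-- pv_equiv track=rewrite | github.com/julianamindev/flaskv2 | flaskv2/utils/helpers.py | classify_stack
-- ===== SOURCE A (Python) =====
-- from typing import Any, Dict, List, Optional
--
-- def classify_stack(states: List[str]) -> str:
--     if not states:
--         return "Unknown"
--     all_running = all(s == "running" for s in states)
--     all_stopped = all(s == "stopped" for s in states)
--     opening = (any(s == "pending" for s in states) or any(s == "running" for s in states)) and any(s == "stopped" for s in states)
--     closing = any(s == "stopping" for s in states)
--     if all_running:
--         return "Running"
--     if all_stopped:
--         return "Off"
--     if opening and not closing:
--         return "Opening"
--     if closing and not opening: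
--         return "Closing"
--     return "Degraded"
-- ===== SOURCE B (Python) =====
-- _BITS = {"pending": 1, "running": 2, "stopped": 4, "stopping": 8}
--
-- def classify_stack(states):
--     if not states:
--         return "Unknown"
--     mask = 0
--     for s in states:
--         mask |= _BITS.get(s, 16)
--     if mask == 2:
--         return "Running"
--     if mask == 4:
--         return "Off"
--     opening = (mask & 3) != 0 and (mask & 4) != 0
--     closing = (mask & 8) != 0
--     if opening and not closing:
--         return "Opening"
--     if closing and not opening:
--         return "Closing"
--     return "Degraded"
-- ===== Notes on version B (the rewrite author's own statement) =====
-- stated objective: alternative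
-- what changed: Replaces A's five separate all/any scans with a single OR-reduction of per-state bitmasks (pending=1, running=2, stopped=4, stopping=8, other=16) and classifies by arithmetic tests on the resulting 5-bit mask (mask==2 -> Running, mask==4 -> Off, bit tests for opening/closing).
import Mathlib
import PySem

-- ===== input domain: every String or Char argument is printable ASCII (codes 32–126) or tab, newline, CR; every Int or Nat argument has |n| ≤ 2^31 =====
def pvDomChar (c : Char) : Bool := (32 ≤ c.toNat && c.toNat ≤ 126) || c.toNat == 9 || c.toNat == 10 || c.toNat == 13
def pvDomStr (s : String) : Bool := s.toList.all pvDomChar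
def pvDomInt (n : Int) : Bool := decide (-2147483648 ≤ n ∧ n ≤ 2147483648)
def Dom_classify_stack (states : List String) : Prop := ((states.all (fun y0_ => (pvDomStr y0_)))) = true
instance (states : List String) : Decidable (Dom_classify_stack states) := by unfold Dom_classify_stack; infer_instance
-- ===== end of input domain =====

-- B replaces A's five all/any scans by one OR-reduction of per-state bitmasks and classifies
-- by arithmetic tests on the resulting 5-bit mask (alternative decomposition, single pass).


-- ===== PORT A =====
def classify_stack (states : List String) : String :=
  if states = [] then "Unknown" else
  let all_running := states.all (fun s => s == "running")
  let all_stopped := states.all (fun s => s == "stopped")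
  let opening := (states.any (fun s => s == "pending") || states.any (fun s => s == "running"))
                   && states.any (fun s => s == "stopped")
  let closing := states.any (fun s => s == "stopping")
  if all_running then "Running"
  else if all_stopped then "Off"
  else if opening && !closing then "Opening"
  else if closing && !opening then "Closing"
  else "Degraded"

-- ===== PORT B =====
-- _BITS.get(s, 16)
def pvBit (s : String) : Nat :=
  if s == "pending" then 1
  else if s == "running" then 2
  else if s == "stopped" then 4
  else if s == "stopping" then 8
  else 16

def classify_stack_alt (states : List String) : String :=
  if states = [] then "Unknown" else
  let mask := states.foldl (fun m s => m ||| pvBit s) 0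
  if mask == 2 then "Running"
  else if mask == 4 then "Off"
  else
    let opening := (mask &&& 3 != 0) && (mask &&& 4 != 0)
    let closing := mask &&& 8 != 0
    if opening && !closing then "Opening"
    else if closing && !opening then "Closing"
    else "Degraded"

-- ===== PRECONDITION & SPEC =====
def Spec_classify_stack (states : List String) (out : String) : Prop := out = classify_stack_alt states
instance (states : List String) (out : String) : Decidable (Spec_classify_stack states out) := by unfold Spec_classify_stack; infer_instance

-- ===== CLAIM (what is proved, stated in full; the proofs are below) =====
def Claim_equal_classify_stack : Prop := ∀ (states : List String), Dom_classify_stack states → Spec_classify_stack states (classify_stack states)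

-- ===== LEMMAS AND PROOFS =====
def pvOther (s : String) : Bool :=
  !((s == "pending") || (s == "running") || (s == "stopped") || (s == "stopping"))

def pvMask5 (aP aR aS aG aO : Bool) : Nat :=
  (if aP then 1 else 0) ||| (if aR then 2 else 0) ||| (if aS then 4 else 0)
    ||| (if aG then 8 else 0) ||| (if aO then 16 else 0)

theorem pv_or1 : ∀ aP aR aS aG aO : Bool, 1 ||| pvMask5 aP aR aS aG aO = pvMask5 true aR aS aG aO := by decide
theorem pv_or2 : ∀ aP aR aS aG aO : Bool, 2 ||| pvMask5 aP aR aS aG aO = pvMask5 aP true aS aG aO := by decide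
theorem pv_or4 : ∀ aP aR aS aG aO : Bool, 4 ||| pvMask5 aP aR aS aG aO = pvMask5 aP aR true aG aO := by decide
theorem pv_or8 : ∀ aP aR aS aG aO : Bool, 8 ||| pvMask5 aP aR aS aG aO = pvMask5 aP aR aS true aO := by decide
theorem pv_or16 : ∀ aP aR aS aG aO : Bool, 16 ||| pvMask5 aP aR aS aG aO = pvMask5 aP aR aS aG true := by decide

theorem pv_fold (l : List String) (acc : Nat) :
    l.foldl (fun m s => m ||| pvBit s) acc
      = acc ||| pvMask5 (l.any (fun s => s == "pending")) (l.any (fun s => s == "running"))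
            (l.any (fun s => s == "stopped")) (l.any (fun s => s == "stopping")) (l.any pvOther) := by
  induction l generalizing acc with
  | nil => simp [pvMask5]
  | cons x xs ih =>
    simp only [List.foldl_cons, ih, List.any_cons, Nat.or_assoc]
    congr 1
    cases hP : (x == "pending") <;> cases hR : (x == "running") <;>
      cases hS : (x == "stopped") <;> cases hG : (x == "stopping") <;>
      simp_all [beq_eq_decide, pvBit, pvOther, pv_or1, pv_or2, pv_or4, pv_or8, pv_or16]

-- pointwise: a string is "running" iff it is none of the other four categories
theorem pv_pt_run (s : String) :
    (!((s == "pending") || (s == "stopped") || (s == "stopping") || pvOther s)) = (s == "running") := by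
  unfold pvOther
  cases hP : (s == "pending") <;> cases hR : (s == "running") <;>
    cases hS : (s == "stopped") <;> cases hG : (s == "stopping") <;>
    simp_all [beq_eq_decide]

theorem pv_pt_stop (s : String) :
    (!((s == "pending") || (s == "running") || (s == "stopping") || pvOther s)) = (s == "stopped") := by
  unfold pvOther
  cases hP : (s == "pending") <;> cases hR : (s == "running") <;>
    cases hS : (s == "stopped") <;> cases hG : (s == "stopping") <;>
    simp_all [beq_eq_decide]

theorem pv_all_run (l : List String) :
    l.all (fun s => s == "running")
      = !(l.any (fun s => s == "pending") || l.any (fun s => s == "stopped")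
          || l.any (fun s => s == "stopping") || l.any pvOther) := by
  induction l with
  | nil => simp
  | cons x xs ih =>
    simp only [List.all_cons, List.any_cons, ih, ← pv_pt_run x]
    cases x == "pending" <;> cases x == "stopped" <;> cases x == "stopping" <;> cases pvOther x <;>
      simp

theorem pv_all_stop (l : List String) :
    l.all (fun s => s == "stopped")
      = !(l.any (fun s => s == "pending") || l.any (fun s => s == "running")
          || l.any (fun s => s == "stopping") || l.any pvOther) := by
  induction l with
  | nil => simp
  | cons x xs ih =>
    simp only [List.all_cons, List.any_cons, ih, ← pv_pt_stop x]
    cases x == "pending" <;> cases x == "running" <;> cases x == "stopping" <;> cases pvOther x <;>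
      simp

theorem pv_cover (x : String) (xs : List String) :
    ((x :: xs).any (fun s => s == "pending") || (x :: xs).any (fun s => s == "running")
      || (x :: xs).any (fun s => s == "stopped") || (x :: xs).any (fun s => s == "stopping")
      || (x :: xs).any pvOther) = true := by
  simp only [List.any_cons, pvOther]
  cases x == "pending" <;> cases x == "running" <;> cases x == "stopped" <;> cases x == "stopping" <;>
    simp

theorem pv_main : ∀ aP aR aS aG aO : Bool, (aP || aR || aS || aG || aO) = true →
    (if !(aP || aS || aG || aO) then "Running"
     else if !(aP || aR || aG || aO) then "Off"
     else if ((aP || aR) && aS) && !aG then "Opening"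
     else if aG && !((aP || aR) && aS) then "Closing"
     else "Degraded")
    = (if pvMask5 aP aR aS aG aO == 2 then "Running"
       else if pvMask5 aP aR aS aG aO == 4 then "Off"
       else if ((pvMask5 aP aR aS aG aO &&& 3 != 0) && (pvMask5 aP aR aS aG aO &&& 4 != 0))
               && !(pvMask5 aP aR aS aG aO &&& 8 != 0) then "Opening"
       else if (pvMask5 aP aR aS aG aO &&& 8 != 0)
               && !((pvMask5 aP aR aS aG aO &&& 3 != 0) && (pvMask5 aP aR aS aG aO &&& 4 != 0)) then "Closing"
       else "Degraded") := by decide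

-- ===== VERDICT (by name: the statement is the Claim_ definition above) =====
theorem classify_stack_spec : Claim_equal_classify_stack := by
  intro states _
  show classify_stack states = classify_stack_alt states
  unfold classify_stack classify_stack_alt
  cases states with
  | nil => simp
  | cons x xs =>
    simp only [reduceCtorEq, if_false, pv_fold, Nat.zero_or, pv_all_run, pv_all_stop]
    exact pv_main _ _ _ _ _ (pv_cover x xs)
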